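-- pv_equiv track=rewrite | github.com/Kitsune-Senko-san/PythonWay | 1. String/Hard level/Restrictive Candy Crush.py | reducedString
-- ===== SOURCE A (Python) =====
-- def reducedString(string, k):
--     result_list = []
--     i = 0
--     while i < len(string):
--         current_letter = string[i]
--         counter_k = 1
--         j = i + 1
--         while j < len(string):
--             # checking 2 letters and ignoring repetitions according to the k value
--             if string[j] == current_letter and counter_k < k:
--                 counter_k += 1
--                 j += 1
--             else:
--                 break
--         if counter_k < k:
--             result_list.append(current_letter)
--         i = j             # starting the check from the correct value
--     return ''.join(result_list)
-- ===== SOURCE B (Python) =====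
-- def reducedString(string, k):
--     if k <= 0:
--         return ''
--     out = []
--     prev = None
--     run_len = 0
--     for ch in string:
--         if ch == prev:
--             run_len += 1
--         else:
--             if prev is not None and run_len % k != 0:
--                 out.append(prev)
--             prev, run_len = ch, 1
--     if prev is not None and run_len % k != 0:
--         out.append(prev)
--     return ''.join(out)
-- ===== Notes on version B (the rewrite author's own statement) =====
-- stated objective: simpler
-- what changed: Replaces A's nested index-based while loops (inner loop re-counts each chunk of up to k equal letters, re-entering the outer loop once per chunk) with a single left-to-right pass that tracks the current run's letter and length and emits the letter once per maximal run iff the run length is not a multiple of k (nothing for k <= 0).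
import Mathlib
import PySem

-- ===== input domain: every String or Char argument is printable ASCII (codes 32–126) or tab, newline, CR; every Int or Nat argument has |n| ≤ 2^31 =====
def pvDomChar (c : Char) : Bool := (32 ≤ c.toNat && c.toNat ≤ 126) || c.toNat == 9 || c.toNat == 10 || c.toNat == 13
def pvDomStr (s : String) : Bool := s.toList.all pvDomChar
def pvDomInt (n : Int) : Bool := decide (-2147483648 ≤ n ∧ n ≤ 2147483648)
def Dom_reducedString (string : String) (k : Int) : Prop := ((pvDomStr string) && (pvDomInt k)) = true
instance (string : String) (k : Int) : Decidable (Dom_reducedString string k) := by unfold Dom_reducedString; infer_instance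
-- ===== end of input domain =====

-- B replaces A's nested index-based chunk loops with one run-length pass emitting a run's letter iff its length is not a multiple of k; same return value, no speed claim.

-- ===== PORT A =====
-- inner while loop of A: advance j while string[j] == current_letter and counter_k < k
def pvInnerA (cs : List Char) (c : Char) (k : Int) (ck : Int) (j : Nat) : Int × Nat :=
  if h : j < cs.length then
    if cs[j] = c ∧ ck < k then pvInnerA cs c k (ck + 1) (j + 1) else (ck, j)
  else (ck, j)
termination_by cs.length - j

theorem pvInnerA_le (cs : List Char) (c : Char) (k ck : Int) (j : Nat) :
    j ≤ (pvInnerA cs c k ck j).2 := by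
  fun_induction pvInnerA <;> simp_all <;> omega

-- outer while loop of A over index i, accumulating result_list
def pvOuterA (cs : List Char) (k : Int) (i : Nat) (acc : List Char) : List Char :=
  if h : i < cs.length then
    pvOuterA cs k (pvInnerA cs cs[i] k 1 (i + 1)).2
      (if (pvInnerA cs cs[i] k 1 (i + 1)).1 < k then acc ++ [cs[i]] else acc)
  else acc
termination_by cs.length - i
decreasing_by
  have := pvInnerA_le cs cs[i] k 1 (i + 1)
  omega

def reducedString (string : String) (k : Int) : String :=
  String.ofList (pvOuterA string.toList k 0 [])

-- ===== PORT B =====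
-- B's single pass: state (out, prev run letter, run length)
def pvLoopB (k : Int) : List Char → List Char → Option Char → Int → List Char × Option Char × Int
  | [], out, prev, rl => (out, prev, rl)
  | ch :: rest, out, prev, rl =>
    if some ch = prev then pvLoopB k rest out prev (rl + 1)
    else pvLoopB k rest (if prev ≠ none ∧ PySem.Int.mod rl k ≠ 0 then out ++ prev.toList else out) (some ch) 1

def reducedString_alt (string : String) (k : Int) : String :=
  if k ≤ 0 then "" else
    let r := pvLoopB k string.toList [] none 0
    String.ofList (if r.2.1 ≠ none ∧ PySem.Int.mod r.2.2 k ≠ 0 then r.1 ++ r.2.1.toList else r.1)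

-- ===== PRECONDITION & SPEC =====
def Spec_reducedString (string : String) (k : Int) (out : String) : Prop := out = reducedString_alt string k
instance (string : String) (k : Int) (out : String) : Decidable (Spec_reducedString string k out) := by unfold Spec_reducedString; infer_instance

-- ===== CLAIM (what is proved, stated in full; the proofs are below) =====
def Claim_equal_reducedString : Prop := ∀ (string : String) (k : Int), Dom_reducedString string k → Spec_reducedString string k (reducedString string k)

-- ===== LEMMAS AND PROOFS =====

-- reference function: per maximal run of letter c with length m, emit c iff m % k ≠ 0
def pvSpec (k : Int) : List Char → List Char
  | [] => []
  | c :: tail =>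
    (if ((1 + (tail.takeWhile (· == c)).length : Int)) % k ≠ 0 then [c] else [])
      ++ pvSpec k (tail.dropWhile (· == c))
termination_by l => l.length
decreasing_by
  have := List.length_dropWhile_le (· == c) tail
  simp only [List.length_cons]
  omega

theorem pvDropWhile_head? (c : Char) (l : List Char) :
    (l.dropWhile (· == c)).head? ≠ some c := by
  induction l with
  | nil => simp
  | cons x xs ih =>
    rw [List.dropWhile_cons]
    by_cases h : x = c
    · simpa [h] using ih
    · simp [h]

theorem pvTakeWhile_replicate (c : Char) (l : List Char) :
    l.takeWhile (· == c) = List.replicate (l.takeWhile (· == c)).length c := by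
  induction l with
  | nil => simp
  | cons x xs ih =>
    by_cases h : x = c
    · subst h
      simp only [List.takeWhile_cons, beq_self_eq_true, if_true, List.length_cons,
        List.replicate_succ, List.cons.injEq, true_and]
      exact ih
    · simp [h]

theorem pvTakeWhile_replicate_append (c : Char) (rest : List Char) (h : rest.head? ≠ some c) :
    ∀ n, (List.replicate n c ++ rest).takeWhile (· == c) = List.replicate n c := by
  intro n
  induction n with
  | zero =>
    cases rest with
    | nil => simp
    | cons x xs =>
      have hx : x ≠ c := by simpa using h
      simp [hx]
  | succ n ih => simp [List.replicate_succ, ih]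

theorem pvDrop_replicate_append (c : Char) (rest : List Char) :
    ∀ (m a : Nat), a ≤ m → (List.replicate m c ++ rest).drop a = List.replicate (m - a) c ++ rest := by
  intro m
  induction m with
  | zero => intro a ha; interval_cases a; simp
  | succ m ih =>
    intro a ha
    cases a with
    | zero => simp
    | succ a =>
      simp only [List.replicate_succ, List.cons_append, List.drop_succ_cons]
      rw [ih a (by omega)]
      have hmn : m + 1 - (a + 1) = m - a := by omega
      rw [hmn]

theorem pvInnerA_eq (cs : List Char) (c : Char) (k : Int) (ck : Int) (j : Nat) :
    pvInnerA cs c k ck j =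
      (ck + ((min ((cs.drop j).takeWhile (· == c)).length (k - ck).toNat : Nat) : Int),
       j + min ((cs.drop j).takeWhile (· == c)).length (k - ck).toNat) := by
  fun_induction pvInnerA with
  | case1 ck j h hcond ih =>
    obtain ⟨hc, hlt⟩ := hcond
    have hdrop : cs.drop j = c :: cs.drop (j + 1) := by
      rw [List.drop_eq_getElem_cons h, hc]
    have htw : ((c :: cs.drop (j + 1)).takeWhile (· == c))
        = c :: (cs.drop (j + 1)).takeWhile (· == c) := by
      simp
    rw [ih, hdrop, htw, List.length_cons, Prod.mk.injEq]
    constructor <;> omega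
  | case2 ck j h hcond =>
    by_cases hc : cs[j] = c
    · have hck : ¬ ck < k := fun hlt => hcond ⟨hc, hlt⟩
      rw [Prod.mk.injEq]
      constructor <;> omega
    · have hdrop : cs.drop j = cs[j] :: cs.drop (j + 1) := List.drop_eq_getElem_cons h
      have htw : ((cs[j] :: cs.drop (j + 1)).takeWhile (· == c)) = [] := by
        simp [hc]
      rw [hdrop, htw, List.length_nil, Prod.mk.injEq]
      constructor <;> omega
  | case3 ck j h =>
    have hdrop : cs.drop j = [] := List.drop_eq_nil_of_le (by omega)
    rw [hdrop]
    simp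

theorem pvOuterA_run (cs : List Char) (k : Int) (hk : 1 ≤ k) :
    ∀ (m i : Nat) (acc rest : List Char) (c : Char),
      1 ≤ m → cs.drop i = List.replicate m c ++ rest → rest.head? ≠ some c →
      pvOuterA cs k i acc =
        pvOuterA cs k (i + m) (acc ++ if (m : Int) % k ≠ 0 then [c] else []) := by
  intro m
  induction m using Nat.strongRecOn with
  | ind m IH =>
    intro i acc rest c hm hdrop0 hrest
    obtain ⟨m', rfl⟩ : ∃ m', m = m' + 1 := ⟨m - 1, by omega⟩
    have hlen : cs.length - i = m' + 1 + rest.length := by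
      have := congrArg List.length hdrop0
      simpa [List.length_drop] using this
    have hi : i < cs.length := by omega
    have h1 : cs.drop i = cs[i] :: cs.drop (i + 1) := List.drop_eq_getElem_cons hi
    have hdrop : cs.drop i = c :: (List.replicate m' c ++ rest) := by
      rw [hdrop0, List.replicate_succ, List.cons_append]
    have hcc : cs[i] = c ∧ cs.drop (i + 1) = List.replicate m' c ++ rest := by
      have h2 := h1.symm.trans hdrop
      exact ⟨by injection h2, by injection h2⟩
    obtain ⟨hc, hdrop1⟩ := hcc
    rw [pvOuterA, dif_pos hi, pvInnerA_eq, hc, hdrop1,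
      pvTakeWhile_replicate_append c rest hrest m', List.length_replicate]
    by_cases hcase : (m' : Int) + 1 < k
    · have hd : min m' (k - 1).toNat = m' := by omega
      rw [hd, if_pos (by push_cast; omega)]
      have hmod : ((m' + 1 : Nat) : Int) % k = ((m' + 1 : Nat) : Int) :=
        Int.emod_eq_of_lt (by push_cast; omega) (by push_cast; omega)
      rw [if_pos (by rw [hmod]; push_cast; omega)]
      have hidx : i + 1 + m' = i + (m' + 1) := by omega
      rw [hidx]
    · have hd : min m' (k - 1).toNat = (k - 1).toNat := by omega
      rw [hd, if_neg (by omega)]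
      have hidx : i + 1 + (k - 1).toNat = i + k.toNat := by omega
      rw [hidx]
      by_cases heq : m' + 1 = k.toNat
      · have hmod : ((m' + 1 : Nat) : Int) % k = 0 := by
          have hq : ((m' + 1 : Nat) : Int) = k := by omega
          rw [hq, Int.emod_self]
        rw [hmod]
        simp only [ne_eq, not_true_eq_false, if_false, List.append_nil]
        rw [heq]
      · have hklt : k.toNat ≤ m' := by omega
        have hdrop2 : cs.drop (i + k.toNat) = List.replicate (m' + 1 - k.toNat) c ++ rest := by
          have hdd : cs.drop (i + k.toNat) = (cs.drop i).drop k.toNat := by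
            rw [List.drop_drop]
          rw [hdd, hdrop0, pvDrop_replicate_append c rest (m' + 1) k.toNat (by omega)]
        rw [IH (m' + 1 - k.toNat) (by omega) (i + k.toNat) acc rest c (by omega) hdrop2 hrest]
        have hidx2 : i + k.toNat + (m' + 1 - k.toNat) = i + (m' + 1) := by omega
        rw [hidx2]
        have hcast : ((m' + 1 - k.toNat : Nat) : Int) = ((m' + 1 : Nat) : Int) - k := by
          push_cast [hklt]
          omega
        rw [hcast, Int.sub_emod_right]

theorem pvOuterA_eq_spec (cs : List Char) (k : Int) (hk : 1 ≤ k) :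
    ∀ (n i : Nat) (acc : List Char), cs.length - i = n →
      pvOuterA cs k i acc = acc ++ pvSpec k (cs.drop i) := by
  intro n
  induction n using Nat.strongRecOn with
  | ind n IH =>
    intro i acc hn
    by_cases hi : i < cs.length
    · have h1 : cs.drop i = cs[i] :: cs.drop (i + 1) := List.drop_eq_getElem_cons hi
      have hrep := pvTakeWhile_replicate cs[i] (cs.drop (i + 1))
      have htr := (List.takeWhile_append_dropWhile (p := (· == cs[i])) (l := cs.drop (i + 1))).symm
      have hdrop : cs.drop i =
          List.replicate (((cs.drop (i + 1)).takeWhile (· == cs[i])).length + 1) cs[i]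
            ++ (cs.drop (i + 1)).dropWhile (· == cs[i]) := by
        rw [h1]
        conv_lhs => rw [htr, hrep]
        rw [List.replicate_succ, List.cons_append]
      have hrh := pvDropWhile_head? cs[i] (cs.drop (i + 1))
      rw [pvOuterA_run cs k hk (((cs.drop (i + 1)).takeWhile (· == cs[i])).length + 1) i acc
        ((cs.drop (i + 1)).dropWhile (· == cs[i])) cs[i] (by omega) hdrop hrh]
      have hlen : i + (((cs.drop (i + 1)).takeWhile (· == cs[i])).length + 1) ≤ cs.length := by
        have := congrArg List.length hdrop
        simp only [List.length_drop, List.length_append, List.length_replicate] at this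
        omega
      have hdropm : cs.drop (i + (((cs.drop (i + 1)).takeWhile (· == cs[i])).length + 1))
          = (cs.drop (i + 1)).dropWhile (· == cs[i]) := by
        rw [show cs.drop (i + (((cs.drop (i + 1)).takeWhile (· == cs[i])).length + 1))
            = (cs.drop i).drop (((cs.drop (i + 1)).takeWhile (· == cs[i])).length + 1) from by
          rw [List.drop_drop]]
        rw [hdrop, pvDrop_replicate_append _ _ _ _ (le_refl _)]
        simp
      rw [IH (cs.length - (i + (((cs.drop (i + 1)).takeWhile (· == cs[i])).length + 1)))
        (by omega) _ _ rfl, hdropm, h1]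
      conv_rhs => rw [pvSpec]
      have hcast : ((((cs.drop (i + 1)).takeWhile (· == cs[i])).length + 1 : Nat) : Int)
          = 1 + (((cs.drop (i + 1)).takeWhile (· == cs[i])).length : Int) := by push_cast; ring
      rw [hcast, List.append_assoc]
    · have hd : cs.drop i = [] := List.drop_eq_nil_of_le (by omega)
      rw [pvOuterA, dif_neg hi, hd]
      simp [pvSpec]

theorem pvOuterA_trivial (cs : List Char) (k : Int) (hk : k ≤ 1) :
    ∀ (n i : Nat) (acc : List Char), cs.length - i = n → pvOuterA cs k i acc = acc := by
  intro n
  induction n using Nat.strongRecOn with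
  | ind n IH =>
    intro i acc hn
    by_cases hi : i < cs.length
    · rw [pvOuterA, dif_pos hi, pvInnerA_eq]
      have h0 : (k - 1).toNat = 0 := by omega
      rw [h0]
      simp only [Nat.min_zero, Nat.add_zero, Nat.cast_zero]
      rw [if_neg (by omega)]
      exact IH (cs.length - (i + 1)) (by omega) (i + 1) acc rfl
    · rw [pvOuterA, dif_neg hi]

theorem pvLoopB_replicate (k : Int) (c : Char) (rest : List Char) :
    ∀ (t : Nat) (out : List Char) (rl : Int),
      pvLoopB k (List.replicate t c ++ rest) out (some c) rl
        = pvLoopB k rest out (some c) (rl + t) := by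
  intro t
  induction t with
  | zero => intro out rl; simp
  | succ t ih =>
    intro out rl
    rw [List.replicate_succ, List.cons_append, pvLoopB, if_pos rfl, ih]
    congr 1
    push_cast
    ring

-- the final append after B's loop
def pvFinishB (k : Int) (r : List Char × Option Char × Int) : List Char :=
  if r.2.1 ≠ none ∧ PySem.Int.mod r.2.2 k ≠ 0 then r.1 ++ r.2.1.toList else r.1

theorem pvLoopB_eq_spec (k : Int) (hk : 1 ≤ k) :
    ∀ (n : Nat) (l out : List Char) (c : Char) (rl : Int), l.length = n → 1 ≤ rl →
      l.head? ≠ some c →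
      pvFinishB k (pvLoopB k l out (some c) rl)
        = out ++ (if rl % k ≠ 0 then [c] else []) ++ pvSpec k l := by
  intro n
  induction n using Nat.strongRecOn with
  | ind n IH =>
    intro l out c rl hn hrl hhd
    cases l with
    | nil =>
      simp only [pvLoopB, pvFinishB, PySem.Int.mod_eq_emod_of_pos (show (0:Int) < k by omega)]
      by_cases h : rl % k = 0 <;> simp [pvSpec, h]
    | cons ch tail =>
      have hch : ch ≠ c := by simpa using hhd
      have htr : tail = List.replicate ((tail.takeWhile (· == ch)).length) ch
          ++ tail.dropWhile (· == ch) := by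
        conv_lhs => rw [← List.takeWhile_append_dropWhile (p := (· == ch)) (l := tail),
          pvTakeWhile_replicate ch tail]
      conv_lhs =>
        rw [show pvLoopB k (ch :: tail) out (some c) rl
            = pvLoopB k tail
                (if some c ≠ none ∧ PySem.Int.mod rl k ≠ 0 then out ++ (some c).toList else out)
                (some ch) 1 from by
          simp only [pvLoopB]
          rw [if_neg (by simpa using hch)]]
        rw [htr, pvLoopB_replicate]
      rw [IH ((tail.dropWhile (· == ch)).length)
          (by have := List.length_dropWhile_le (· == ch) tail; simp only [List.length_cons] at hn; omega)
          (tail.dropWhile (· == ch)) _ ch (1 + ((tail.takeWhile (· == ch)).length : Int)) rfl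
          (by omega) (pvDropWhile_head? ch tail)]
      conv_rhs => rw [pvSpec]
      rw [PySem.Int.mod_eq_emod_of_pos (show (0:Int) < k by omega)]
      simp only [ne_eq, reduceCtorEq, not_false_eq_true, true_and, Option.toList_some]
      by_cases h : rl % k = 0 <;> simp [h, List.append_assoc]

theorem pvB_main (k : Int) (hk : 1 ≤ k) (cs : List Char) :
    pvFinishB k (pvLoopB k cs [] none 0) = pvSpec k cs := by
  cases cs with
  | nil => simp [pvLoopB, pvFinishB, pvSpec]
  | cons c tail =>
    have htr : tail = List.replicate ((tail.takeWhile (· == c)).length) c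
        ++ tail.dropWhile (· == c) := by
      conv_lhs => rw [← List.takeWhile_append_dropWhile (p := (· == c)) (l := tail),
        pvTakeWhile_replicate c tail]
    conv_lhs =>
      rw [show pvLoopB k (c :: tail) [] none 0 = pvLoopB k tail [] (some c) 1 from by
        simp [pvLoopB]]
      rw [htr, pvLoopB_replicate]
    rw [pvLoopB_eq_spec k hk ((tail.dropWhile (· == c)).length) (tail.dropWhile (· == c)) []
      c (1 + ((tail.takeWhile (· == c)).length : Int)) rfl (by omega) (pvDropWhile_head? c tail)]
    conv_rhs => rw [pvSpec]
    simp

theorem reducedString_spec : Claim_equal_reducedString := by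
  unfold Claim_equal_reducedString
  intro s k _
  unfold Spec_reducedString
  by_cases hk : k ≤ 0
  · rw [reducedString, reducedString_alt, if_pos hk,
      pvOuterA_trivial s.toList k (by omega) (s.toList.length - 0) 0 [] rfl]
  · have hk1 : (1:Int) ≤ k := by omega
    rw [reducedString, reducedString_alt, if_neg hk,
      pvOuterA_eq_spec s.toList k hk1 (s.toList.length - 0) 0 [] rfl]
    simp only [List.drop_zero, List.nil_append]
    show String.ofList (pvSpec k s.toList)
      = String.ofList (pvFinishB k (pvLoopB k s.toList [] none 0))
    rw [pvB_main k hk1 s.toList]
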